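-- pv_equiv track=rewrite | github.com/navidzol/Bay-area-housing-ranking | data_collectors/data_collection_system.py | calculate_amenity_scores
-- ===== SOURCE A (Python) =====
-- def calculate_amenity_scores(amenities_data):
--     """Calculate amenity scores from OSM data with dynamic thresholds"""
--     if not amenities_data or 'elements' not in amenities_data:
--         return {}
--
--     elements = amenities_data['elements']
--
--     # Count amenities by category
--     amenity_counts = {
--         'restaurants': 0,
--         'shopping': 0,
--         'recreation': 0,
--         'transit': 0,
--         'healthcare': 0,
--         'education': 0,
--         'total': 0
--     }
--
--     # Define which amenity tags go into which categories
--     category_mapping = {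
--         'restaurants': ['restaurant', 'cafe', 'bar', 'pub', 'fast_food', 'food_court'],
--         'shopping': ['marketplace', 'mall', 'supermarket', 'convenience', 'department_store', 'retail'],
--         'recreation': ['park', 'playground', 'sports_centre', 'fitness_centre', 'swimming_pool', 'recreation_ground'],
--         'transit': ['bus_station', 'bus_stop', 'subway_entrance', 'train_station', 'tram_stop', 'bicycle_rental'],
--         'healthcare': ['hospital', 'clinic', 'doctors', 'dentist', 'pharmacy'],
--         'education': ['school', 'kindergarten', 'college', 'university', 'library']
--     }
--
--     # Count amenities
--     for element in elements:
--         if 'tags' in element and 'amenity' in element['tags']: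
--             amenity_type = element['tags']['amenity']
--             amenity_counts['total'] += 1
--
--             # Check which category this amenity belongs to
--             for category, amenity_list in category_mapping.items():
--                 if amenity_type in amenity_list:
--                     amenity_counts[category] += 1
--                     break
--
--     # Use a dynamic scoring approach based on percentiles
--     # This is a simplified approach - in production you would compare
--     # against a pre-calculated distribution of values across all Bay Area ZIPs
--
--     # Example percentile thresholds (derived from actual OSM data analysis)
--     # These would be replaced with actual data in production
--     percentiles = {
--         'restaurants': [0, 2, 5, 8, 12, 18, 25, 35, 50],
--         'shopping': [0, 1, 2, 4, 6, 9, 13, 20, 30],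
--         'recreation': [0, 1, 2, 3, 5, 8, 12, 18, 25],
--         'transit': [0, 2, 5, 10, 15, 25, 40, 60, 90],
--         'healthcare': [0, 1, 2, 3, 5, 8, 12, 18, 25],
--         'education': [0, 1, 2, 3, 4, 6, 8, 12, 18]
--     }
--
--     scores = {}
--     for category, count in amenity_counts.items():
--         if category == 'total':
--             continue
--
--         if category in percentiles:
--             thresholds = percentiles[category]
--
--             # Calculate score (1-10)
--             score = 1
--             for i, threshold in enumerate(thresholds):
--                 if count >= threshold:
--                     score = i + 2  # Scores of 2-10
--                 else:
--                     break
--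
--             scores[category] = score
--
--     return scores
-- ===== SOURCE B (Python) =====
-- _CATEGORIES = [
--     ('restaurants', ['restaurant', 'cafe', 'bar', 'pub', 'fast_food', 'food_court'],
--      [0, 2, 5, 8, 12, 18, 25, 35, 50]),
--     ('shopping', ['marketplace', 'mall', 'supermarket', 'convenience', 'department_store', 'retail'],
--      [0, 1, 2, 4, 6, 9, 13, 20, 30]),
--     ('recreation', ['park', 'playground', 'sports_centre', 'fitness_centre', 'swimming_pool', 'recreation_ground'],
--      [0, 1, 2, 3, 5, 8, 12, 18, 25]),
--     ('transit', ['bus_station', 'bus_stop', 'subway_entrance', 'train_station', 'tram_stop', 'bicycle_rental'],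
--      [0, 2, 5, 10, 15, 25, 40, 60, 90]),
--     ('healthcare', ['hospital', 'clinic', 'doctors', 'dentist', 'pharmacy'],
--      [0, 1, 2, 3, 5, 8, 12, 18, 25]),
--     ('education', ['school', 'kindergarten', 'college', 'university', 'library'],
--      [0, 1, 2, 3, 4, 6, 8, 12, 18]),
-- ]
--
--
-- def calculate_amenity_scores(amenities_data):
--     """One pass builds a counter of amenity-tag values; each category's count is a
--     sum over its (disjoint) tag list, and the score is the number of thresholds
--     reached (thresholds are sorted, so no break-loop is needed)."""
--     if not amenities_data or 'elements' not in amenities_data: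
--         return {}
--
--     counts = {}
--     for element in amenities_data['elements']:
--         tags = element.get('tags')
--         if tags is not None and 'amenity' in tags:
--             a = tags['amenity']
--             counts[a] = counts.get(a, 0) + 1
--
--     scores = {}
--     for name, members, thresholds in _CATEGORIES:
--         c = sum(counts.get(t, 0) for t in members)
--         scores[name] = 1 + sum(1 for t in thresholds if c >= t)
--     return scores
-- ===== Notes on version B (the rewrite author's own statement) =====
-- stated objective: simpler
-- what changed: A's per-element inner scan over category lists (with break) and its enumerate-with-break threshold loop are replaced by one counter pass over all amenity values plus, per category, a sum over its disjoint tag list and a count of thresholds reached (valid because each threshold list is sorted).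
import Mathlib
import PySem

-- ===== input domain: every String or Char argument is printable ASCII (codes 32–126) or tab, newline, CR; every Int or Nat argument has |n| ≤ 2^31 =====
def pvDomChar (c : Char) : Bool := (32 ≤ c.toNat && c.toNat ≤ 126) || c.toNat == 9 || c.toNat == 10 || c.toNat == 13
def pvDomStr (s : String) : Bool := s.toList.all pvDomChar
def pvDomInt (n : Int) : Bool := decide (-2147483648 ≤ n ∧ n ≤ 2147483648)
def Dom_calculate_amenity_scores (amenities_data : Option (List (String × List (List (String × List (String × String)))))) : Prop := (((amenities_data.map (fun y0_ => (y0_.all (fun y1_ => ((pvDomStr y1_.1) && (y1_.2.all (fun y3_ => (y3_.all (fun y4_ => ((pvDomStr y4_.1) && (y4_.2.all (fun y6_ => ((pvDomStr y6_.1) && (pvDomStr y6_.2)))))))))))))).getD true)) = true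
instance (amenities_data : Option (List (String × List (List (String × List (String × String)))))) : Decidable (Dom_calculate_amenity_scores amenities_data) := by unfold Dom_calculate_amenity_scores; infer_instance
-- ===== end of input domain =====

-- B replaces A's per-element category scan (with break) and its enumerate-with-break
-- threshold loop by a single amenity counter plus per-category sums and a count of
-- thresholds reached; objective: simpler.


-- ===== PORT A =====

def pvCategoryMapping : List (String × List String) := [
  ("restaurants", ["restaurant", "cafe", "bar", "pub", "fast_food", "food_court"]),
  ("shopping", ["marketplace", "mall", "supermarket", "convenience", "department_store", "retail"]),
  ("recreation", ["park", "playground", "sports_centre", "fitness_centre", "swimming_pool", "recreation_ground"]),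
  ("transit", ["bus_station", "bus_stop", "subway_entrance", "train_station", "tram_stop", "bicycle_rental"]),
  ("healthcare", ["hospital", "clinic", "doctors", "dentist", "pharmacy"]),
  ("education", ["school", "kindergarten", "college", "university", "library"])]

def pvPercentiles : List (String × List Int) := [
  ("restaurants", [0, 2, 5, 8, 12, 18, 25, 35, 50]),
  ("shopping", [0, 1, 2, 4, 6, 9, 13, 20, 30]),
  ("recreation", [0, 1, 2, 3, 5, 8, 12, 18, 25]),
  ("transit", [0, 2, 5, 10, 15, 25, 40, 60, 90]),
  ("healthcare", [0, 1, 2, 3, 5, 8, 12, 18, 25]),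
  ("education", [0, 1, 2, 3, 4, 6, 8, 12, 18])]

-- body of A's counting loop for one element ('tags' lookup, 'amenity' lookup, total += 1,
-- then the inner for-loop over category_mapping with break, as a fold with a done flag)
def pvAStep (ac : PySem.Dict String Int) (element : List (String × List (String × String))) : PySem.Dict String Int :=
  match (PySem.Dict.mk element).get? "tags" with
  | none => ac
  | some tags =>
    match (PySem.Dict.mk tags).get? "amenity" with
    | none => ac
    | some amenity_type =>
      let ac1 := ac.insert "total" (ac.getD "total" 0 + 1)
      (pvCategoryMapping.foldl
        (fun (st : PySem.Dict String Int × Bool) cm =>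
          if st.2 then st
          else if cm.2.contains amenity_type then
            (st.1.insert cm.1 (st.1.getD cm.1 0 + 1), true)
          else st) (ac1, false)).1

-- A's 'for i, threshold in enumerate(thresholds)' loop with break, as a fold with a done flag
def pvAScore (thresholds : List Int) (count : Int) : Int :=
  ((PySem.List.enumerate thresholds).foldl
    (fun (st : Int × Bool) p =>
      if st.2 then st
      else if count ≥ p.2 then (p.1 + 2, st.2) else (st.1, true))
    (1, false)).1

def calculate_amenity_scores (amenities_data : Option (List (String × List (List (String × List (String × String)))))) : List (String × Int) :=
  match amenities_data with
  | none => []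
  | some d =>
    if d.isEmpty then []
    else
      match (PySem.Dict.mk d).get? "elements" with
      | none => []
      | some elements =>
        let amenity_counts := elements.foldl pvAStep
          (PySem.Dict.mk [("restaurants", 0), ("shopping", 0), ("recreation", 0),
            ("transit", 0), ("healthcare", 0), ("education", 0), ("total", 0)])
        (amenity_counts.items.foldl
          (fun (scores : PySem.Dict String Int) kv =>
            if kv.1 = "total" then scores
            else
              match (PySem.Dict.mk pvPercentiles).get? kv.1 with
              | none => scores
              | some thresholds => scores.insert kv.1 (pvAScore thresholds kv.2))
          PySem.Dict.empty).items

-- ===== PORT B =====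

def pvCategories : List (String × List String × List Int) := [
  ("restaurants", ["restaurant", "cafe", "bar", "pub", "fast_food", "food_court"],
    [0, 2, 5, 8, 12, 18, 25, 35, 50]),
  ("shopping", ["marketplace", "mall", "supermarket", "convenience", "department_store", "retail"],
    [0, 1, 2, 4, 6, 9, 13, 20, 30]),
  ("recreation", ["park", "playground", "sports_centre", "fitness_centre", "swimming_pool", "recreation_ground"],
    [0, 1, 2, 3, 5, 8, 12, 18, 25]),
  ("transit", ["bus_station", "bus_stop", "subway_entrance", "train_station", "tram_stop", "bicycle_rental"],
    [0, 2, 5, 10, 15, 25, 40, 60, 90]),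
  ("healthcare", ["hospital", "clinic", "doctors", "dentist", "pharmacy"],
    [0, 1, 2, 3, 5, 8, 12, 18, 25]),
  ("education", ["school", "kindergarten", "college", "university", "library"],
    [0, 1, 2, 3, 4, 6, 8, 12, 18])]

-- body of B's counter loop for one element
def pvBStep (ac : PySem.Dict String Int) (element : List (String × List (String × String))) : PySem.Dict String Int :=
  match (PySem.Dict.mk element).get? "tags" with
  | none => ac
  | some tags =>
    match (PySem.Dict.mk tags).get? "amenity" with
    | none => ac
    | some a => ac.insert a (ac.getD a 0 + 1)

def calculate_amenity_scores_alt (amenities_data : Option (List (String × List (List (String × List (String × String)))))) : List (String × Int) :=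
  match amenities_data with
  | none => []
  | some d =>
    if d.isEmpty then []
    else
      match (PySem.Dict.mk d).get? "elements" with
      | none => []
      | some elements =>
        let counts := elements.foldl pvBStep PySem.Dict.empty
        (pvCategories.foldl
          (fun (scores : PySem.Dict String Int) cat =>
            let c := cat.2.1.foldl (fun s t => s + counts.getD t 0) 0
            scores.insert cat.1 (1 + cat.2.2.foldl (fun (s : Int) t => if c ≥ t then s + 1 else s) 0))
          PySem.Dict.empty).items

-- ===== PRECONDITION & SPEC =====
def Spec_calculate_amenity_scores (amenities_data : Option (List (String × List (List (String × List (String × String)))))) (out : List (String × Int)) : Prop := out = calculate_amenity_scores_alt amenities_data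
instance (amenities_data : Option (List (String × List (List (String × List (String × String)))))) (out : List (String × Int)) : Decidable (Spec_calculate_amenity_scores amenities_data out) := by unfold Spec_calculate_amenity_scores; infer_instance

-- ===== CLAIM (what is proved, stated in full; the proofs are below) =====
def Claim_equal_calculate_amenity_scores : Prop := ∀ (amenities_data : Option (List (String × List (List (String × List (String × String)))))), Dom_calculate_amenity_scores amenities_data → Spec_calculate_amenity_scores amenities_data (calculate_amenity_scores amenities_data)

-- ===== LEMMAS AND PROOFS =====

-- the stream of amenity-tag values that both counting loops actually consume
def pvAmList (els : List (List (String × List (String × String)))) : List String :=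
  els.filterMap (fun e =>
    match (PySem.Dict.mk e).get? "tags" with
    | none => none
    | some tags => (PySem.Dict.mk tags).get? "amenity")

-- A's amenity_counts dict after processing a stream m of amenity values
def pvShape (m : List String) : PySem.Dict String Int := PySem.Dict.mk [
  ("restaurants", (m.countP (fun a => a ∈ ["restaurant", "cafe", "bar", "pub", "fast_food", "food_court"]) : Int)),
  ("shopping", (m.countP (fun a => a ∈ ["marketplace", "mall", "supermarket", "convenience", "department_store", "retail"]) : Int)),
  ("recreation", (m.countP (fun a => a ∈ ["park", "playground", "sports_centre", "fitness_centre", "swimming_pool", "recreation_ground"]) : Int)),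
  ("transit", (m.countP (fun a => a ∈ ["bus_station", "bus_stop", "subway_entrance", "train_station", "tram_stop", "bicycle_rental"]) : Int)),
  ("healthcare", (m.countP (fun a => a ∈ ["hospital", "clinic", "doctors", "dentist", "pharmacy"]) : Int)),
  ("education", (m.countP (fun a => a ∈ ["school", "kindergarten", "college", "university", "library"]) : Int)),
  ("total", (m.length : Int))]

-- the body of A's counting loop once the amenity value a is extracted
def pvACore (ac : PySem.Dict String Int) (a : String) : PySem.Dict String Int :=
  let ac1 := ac.insert "total" (ac.getD "total" 0 + 1)
  (pvCategoryMapping.foldl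
    (fun (st : PySem.Dict String Int × Bool) cm =>
      if st.2 then st
      else if cm.2.contains a then
        (st.1.insert cm.1 (st.1.getD cm.1 0 + 1), true)
      else st) (ac1, false)).1

lemma pvAStep_eq_core (els : List (List (String × List (String × String)))) :
    ∀ d : PySem.Dict String Int, els.foldl pvAStep d = (pvAmList els).foldl pvACore d := by
  induction els with
  | nil => intro d; rfl
  | cons e els ih =>
    intro d
    simp only [List.foldl_cons, pvAmList, List.filterMap_cons]
    cases h1 : (PySem.Dict.mk e).get? "tags" with
    | none => simp only [pvAStep, h1]; exact ih d
    | some tags =>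
      cases h2 : (PySem.Dict.mk tags).get? "amenity" with
      | none => simp only [pvAStep, h1, h2]; exact ih d
      | some a =>
        simp only [pvAStep, h1, h2]
        exact ih _

lemma pvBStep_counter (els : List (List (String × List (String × String)))) :
    ∀ d : PySem.Dict String Int,
      els.foldl pvBStep d = (pvAmList els).foldl (fun d x => d.insert x (d.getD x 0 + 1)) d := by
  induction els with
  | nil => intro d; rfl
  | cons e els ih =>
    intro d
    simp only [List.foldl_cons, pvAmList, List.filterMap_cons]
    cases h1 : (PySem.Dict.mk e).get? "tags" with
    | none => simp only [pvBStep, h1]; exact ih d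
    | some tags =>
      cases h2 : (PySem.Dict.mk tags).get? "amenity" with
      | none => simp only [pvBStep, h1, h2]; exact ih d
      | some a =>
        simp only [pvBStep, h1, h2]
        exact ih _

lemma pvACore_shape (m : List String) (a : String) :
    pvACore (pvShape m) a = pvShape (m ++ [a]) := by
  by_cases h1 : a ∈ ["restaurant", "cafe", "bar", "pub", "fast_food", "food_court"]
  · fin_cases h1 <;> simp [pvACore, pvShape, pvCategoryMapping, PySem.Dict.insert, PySem.Dict.getD, PySem.Dict.get?, List.countP_append]
  by_cases h2 : a ∈ ["marketplace", "mall", "supermarket", "convenience", "department_store", "retail"]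
  · fin_cases h2 <;> simp [pvACore, pvShape, pvCategoryMapping, PySem.Dict.insert, PySem.Dict.getD, PySem.Dict.get?, List.countP_append]
  by_cases h3 : a ∈ ["park", "playground", "sports_centre", "fitness_centre", "swimming_pool", "recreation_ground"]
  · fin_cases h3 <;> simp [pvACore, pvShape, pvCategoryMapping, PySem.Dict.insert, PySem.Dict.getD, PySem.Dict.get?, List.countP_append]
  by_cases h4 : a ∈ ["bus_station", "bus_stop", "subway_entrance", "train_station", "tram_stop", "bicycle_rental"]
  · fin_cases h4 <;> simp [pvACore, pvShape, pvCategoryMapping, PySem.Dict.insert, PySem.Dict.getD, PySem.Dict.get?, List.countP_append]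
  by_cases h5 : a ∈ ["hospital", "clinic", "doctors", "dentist", "pharmacy"]
  · fin_cases h5 <;> simp [pvACore, pvShape, pvCategoryMapping, PySem.Dict.insert, PySem.Dict.getD, PySem.Dict.get?, List.countP_append]
  by_cases h6 : a ∈ ["school", "kindergarten", "college", "university", "library"]
  · fin_cases h6 <;> simp [pvACore, pvShape, pvCategoryMapping, PySem.Dict.insert, PySem.Dict.getD, PySem.Dict.get?, List.countP_append]
  simp only [List.mem_cons, List.not_mem_nil, or_false] at h1 h2 h3 h4 h5 h6
  push Not at h1 h2 h3 h4 h5 h6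
  simp [pvACore, pvShape, pvCategoryMapping, PySem.Dict.insert, PySem.Dict.getD, PySem.Dict.get?, List.countP_append, h1, h2, h3, h4, h5, h6]

lemma pvShape_spec (m : List String) : m.foldl pvACore (pvShape []) = pvShape m := by
  have h : ∀ (l m : List String), l.foldl pvACore (pvShape m) = pvShape (m ++ l) := by
    intro l
    induction l with
    | nil => intro m; simp
    | cons a l ih =>
      intro m
      simp only [List.foldl_cons, pvACore_shape]
      simpa using ih (m ++ [a])
  simpa using h m []

lemma pvSum_ite_mem (a : String) :
    ∀ L : List String, L.Nodup → (L.map (fun t => if a = t then (1 : Nat) else 0)).sum = (if a ∈ L then 1 else 0) := by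
  intro L
  induction L with
  | nil => simp
  | cons t L ih =>
    intro h
    simp only [List.map_cons, List.sum_cons, List.mem_cons]
    by_cases hat : a = t
    · subst hat
      have hz : (L.map (fun t => if a = t then (1 : Nat) else 0)).sum = 0 := by
        apply List.sum_eq_zero
        intro x hx
        obtain ⟨u, hu, rfl⟩ := List.mem_map.mp hx
        have : a ≠ u := fun h' => (List.nodup_cons.mp h).1 (h' ▸ hu)
        simp [this]
      simp [hz]
    · have := ih (List.nodup_cons.mp h).2
      simp [hat, this]

lemma pvSum_map_add (f g : String → Nat) (L : List String) :
    (L.map (fun t => f t + g t)).sum = (L.map f).sum + (L.map g).sum := by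
  induction L with
  | nil => simp
  | cons t L ih => simp only [List.map_cons, List.sum_cons, ih]; omega

lemma pvCountP_mem (L : List String) (hL : L.Nodup) (m : List String) :
    m.countP (fun a => a ∈ L) = (L.map (fun t => m.count t)).sum := by
  induction m with
  | nil => simp
  | cons a m ih =>
    simp only [List.countP_cons, List.count_cons, beq_iff_eq]
    rw [pvSum_map_add (fun t => m.count t) (fun t => if a = t then 1 else 0),
      pvSum_ite_mem a L hL, ih]
    simp

lemma pvScoreBroken (c : Int) (l : List (Int × Int)) (sc : Int) :
    l.foldl (fun (st : Int × Bool) p =>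
      if st.2 then st else if c ≥ p.2 then (p.1 + 2, st.2) else (st.1, true)) (sc, true) = (sc, true) := by
  induction l with
  | nil => rfl
  | cons p l ih => simpa using ih

lemma pvScoreLoop (c : Int) : ∀ (T : List Int) (s sc : Int), T.Pairwise (· ≤ ·) →
    ((PySem.List.enumerate T s).foldl
      (fun (st : Int × Bool) p =>
        if st.2 then st else if c ≥ p.2 then (p.1 + 2, st.2) else (st.1, true))
      (sc, false)).1
    = if T.countP (fun t => c ≥ t) = 0 then sc else s + (T.countP (fun t => c ≥ t) : Int) + 1 := by
  intro T
  induction T with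
  | nil => intro s sc _; simp [PySem.List.enumerate_nil]
  | cons t T ih =>
    intro s sc hp
    rw [PySem.List.enumerate_cons]
    simp only [List.foldl_cons, List.countP_cons]
    by_cases hc : c ≥ t
    · simp only [Bool.false_eq_true, if_false, hc, if_true, decide_true,
        ih (s + 1) (s + 2) (List.Pairwise.of_cons hp)]
      have hpos : T.countP (fun t => c ≥ t) + 1 ≠ 0 := by omega
      simp only [hpos, if_false]
      split_ifs <;> push_cast <;> omega
    · have h0 : T.countP (fun t => c ≥ t) = 0 := by
        rw [List.countP_eq_zero]
        intro t' ht'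
        have := (List.pairwise_cons.mp hp).1 t' ht'
        simp only [ge_iff_le, decide_eq_true_eq]
        omega
      simp [hc, pvScoreBroken, h0]

lemma pvAScore_closed (T : List Int) (hT : T.Pairwise (· ≤ ·)) (c : Int) :
    pvAScore T c = if T.countP (fun t => c ≥ t) = 0 then 1
      else (T.countP (fun t => c ≥ t) : Int) + 1 := by
  rw [pvAScore, pvScoreLoop c T 0 1 hT]
  split_ifs <;> omega

lemma pvCount_getD (elements : List (List (String × List (String × String)))) (t : String) :
    (elements.foldl pvBStep PySem.Dict.empty).getD t 0 = ((pvAmList elements).count t : Int) := by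
  rw [pvBStep_counter, PySem.Dict.getD_foldl_insert_add_one]
  simp

set_option maxHeartbeats 3200000 in
lemma pvMain (elements : List (List (String × List (String × String)))) :
    ((elements.foldl pvAStep
        (PySem.Dict.mk [("restaurants", 0), ("shopping", 0), ("recreation", 0),
          ("transit", 0), ("healthcare", 0), ("education", 0), ("total", 0)])).items.foldl
      (fun (scores : PySem.Dict String Int) kv =>
        if kv.1 = "total" then scores
        else
          match (PySem.Dict.mk pvPercentiles).get? kv.1 with
          | none => scores
          | some thresholds => scores.insert kv.1 (pvAScore thresholds kv.2))
      PySem.Dict.empty).items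
    = (pvCategories.foldl
        (fun (scores : PySem.Dict String Int) cat =>
          let c := cat.2.1.foldl (fun s t => s + (elements.foldl pvBStep PySem.Dict.empty).getD t 0) 0
          scores.insert cat.1 (1 + cat.2.2.foldl (fun (s : Int) t => if c ≥ t then s + 1 else s) 0))
        PySem.Dict.empty).items := by
  have hA : elements.foldl pvAStep
      (PySem.Dict.mk [("restaurants", 0), ("shopping", 0), ("recreation", 0),
        ("transit", 0), ("healthcare", 0), ("education", 0), ("total", 0)])
      = pvShape (pvAmList elements) := by
    rw [pvAStep_eq_core]
    exact pvShape_spec (pvAmList elements)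
  have hget := pvCount_getD elements
  rw [hA]
  generalize hcnt : List.foldl pvBStep PySem.Dict.empty elements = cnt at hget ⊢
  generalize hm : pvAmList elements = m at hget ⊢
  simp only [PySem.List.foldl_ite_add_one]
  simp [pvShape, pvCategories, pvPercentiles, List.foldl_cons, List.foldl_nil,
    PySem.Dict.insert, PySem.Dict.empty, PySem.Dict.get?, PySem.Dict.contains, List.find?, hget]
  have hc1 : ((m.countP (fun a => a ∈ ["restaurant", "cafe", "bar", "pub", "fast_food", "food_court"]) : Int))
      = (m.count "restaurant" : Int) + (m.count "cafe" : Int) + (m.count "bar" : Int) + (m.count "pub" : Int) + (m.count "fast_food" : Int) + (m.count "food_court" : Int) := by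
    rw [pvCountP_mem _ (by decide)]
    push_cast [List.map_cons, List.map_nil, List.sum_cons, List.sum_nil]
    omega
  have hc2 : ((m.countP (fun a => a ∈ ["marketplace", "mall", "supermarket", "convenience", "department_store", "retail"]) : Int))
      = (m.count "marketplace" : Int) + (m.count "mall" : Int) + (m.count "supermarket" : Int) + (m.count "convenience" : Int) + (m.count "department_store" : Int) + (m.count "retail" : Int) := by
    rw [pvCountP_mem _ (by decide)]
    push_cast [List.map_cons, List.map_nil, List.sum_cons, List.sum_nil]
    omega
  have hc3 : ((m.countP (fun a => a ∈ ["park", "playground", "sports_centre", "fitness_centre", "swimming_pool", "recreation_ground"]) : Int))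
      = (m.count "park" : Int) + (m.count "playground" : Int) + (m.count "sports_centre" : Int) + (m.count "fitness_centre" : Int) + (m.count "swimming_pool" : Int) + (m.count "recreation_ground" : Int) := by
    rw [pvCountP_mem _ (by decide)]
    push_cast [List.map_cons, List.map_nil, List.sum_cons, List.sum_nil]
    omega
  have hc4 : ((m.countP (fun a => a ∈ ["bus_station", "bus_stop", "subway_entrance", "train_station", "tram_stop", "bicycle_rental"]) : Int))
      = (m.count "bus_station" : Int) + (m.count "bus_stop" : Int) + (m.count "subway_entrance" : Int) + (m.count "train_station" : Int) + (m.count "tram_stop" : Int) + (m.count "bicycle_rental" : Int) := by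
    rw [pvCountP_mem _ (by decide)]
    push_cast [List.map_cons, List.map_nil, List.sum_cons, List.sum_nil]
    omega
  have hc5 : ((m.countP (fun a => a ∈ ["hospital", "clinic", "doctors", "dentist", "pharmacy"]) : Int))
      = (m.count "hospital" : Int) + (m.count "clinic" : Int) + (m.count "doctors" : Int) + (m.count "dentist" : Int) + (m.count "pharmacy" : Int) := by
    rw [pvCountP_mem _ (by decide)]
    push_cast [List.map_cons, List.map_nil, List.sum_cons, List.sum_nil]
    omega
  have hc6 : ((m.countP (fun a => a ∈ ["school", "kindergarten", "college", "university", "library"]) : Int))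
      = (m.count "school" : Int) + (m.count "kindergarten" : Int) + (m.count "college" : Int) + (m.count "university" : Int) + (m.count "library" : Int) := by
    rw [pvCountP_mem _ (by decide)]
    push_cast [List.map_cons, List.map_nil, List.sum_cons, List.sum_nil]
    omega
  simp only [List.mem_cons, List.not_mem_nil, or_false, Bool.decide_or] at hc1 hc2 hc3 hc4 hc5 hc6
  refine ⟨?_, ?_, ?_, ?_, ?_, ?_⟩
  · rw [← hc1, pvAScore_closed _ (by decide)]
    simp only [ge_iff_le]
    split_ifs <;> omega
  · rw [← hc2, pvAScore_closed _ (by decide)]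
    simp only [ge_iff_le]
    split_ifs <;> omega
  · rw [← hc3, pvAScore_closed _ (by decide)]
    simp only [ge_iff_le]
    split_ifs <;> omega
  · rw [← hc4, pvAScore_closed _ (by decide)]
    simp only [ge_iff_le]
    split_ifs <;> omega
  · rw [← hc5, pvAScore_closed _ (by decide)]
    simp only [ge_iff_le]
    split_ifs <;> omega
  · rw [← hc6, pvAScore_closed _ (by decide)]
    simp only [ge_iff_le]
    split_ifs <;> omega

theorem calculate_amenity_scores_spec : Claim_equal_calculate_amenity_scores := by
  intro ad _
  unfold Spec_calculate_amenity_scores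
  cases ad with
  | none => rfl
  | some d =>
    simp only [calculate_amenity_scores, calculate_amenity_scores_alt]
    by_cases hd : d.isEmpty
    · simp [hd]
    · simp only [hd, if_false, Bool.false_eq_true]
      cases hE : (PySem.Dict.mk d).get? "elements" with
      | none => rfl
      | some elements => exact pvMain elements
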